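-- pv_equiv track=rewrite | github.com/Joonspar/codetree-TILs | 240815/최소 와이파이 수/minimum-number-of-wifi.py | minimum_wifi
-- ===== SOURCE A (Python) =====
-- def minimum_wifi(n, m, people):
--     count = 0
--     i = 0
--
--     while i < n:
--         # 현재 위치에서 와이파이를 설치할 수 있는 가장 멀리 위치
--         if people[i] == 1:
--             count += 1
--             # 와이파이를 설치하고 그 범위만큼 건너뛰기
--             i += 2 * m + 1
--         else:
--             i += 1
--
--     return count
-- ===== SOURCE B (Python) =====
-- def minimum_wifi(n, m, people):
--     # Stage 1: materialize the positions of people as a work stack (rightmost on the bottom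
--     # ... reversed so the leftmost position is on top).
--     stack = [i for i in range(n) if people[i] == 1][::-1]
--     count = 0
--     # Stage 2: repeatedly pop the leftmost remaining person, install wifi there,
--     # then pop everyone that installation covers off the stack.
--     while stack:
--         p = stack.pop()
--         count += 1
--         limit = p + 2 * m
--         while stack and stack[-1] <= limit:
--             stack.pop()
--     return count
-- ===== Notes on version B (the rewrite author's own statement) =====
-- stated objective: alternative
-- what changed: Replaces A's single index-jumping scan over people with a two-stage algorithm: first materialize the list of positions of 1s reversed into an explicit work stack, then repeatedly pop the leftmost person, count an installation, and pop every covered position off the stack.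
-- outside the precondition, e.g. on minimum_wifi(5, 2, [1]): A returns 1, B raises IndexError; on minimum_wifi(2, -1, [0, 1]): A does not finish within the time limit, B returns 1
import Mathlib
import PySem

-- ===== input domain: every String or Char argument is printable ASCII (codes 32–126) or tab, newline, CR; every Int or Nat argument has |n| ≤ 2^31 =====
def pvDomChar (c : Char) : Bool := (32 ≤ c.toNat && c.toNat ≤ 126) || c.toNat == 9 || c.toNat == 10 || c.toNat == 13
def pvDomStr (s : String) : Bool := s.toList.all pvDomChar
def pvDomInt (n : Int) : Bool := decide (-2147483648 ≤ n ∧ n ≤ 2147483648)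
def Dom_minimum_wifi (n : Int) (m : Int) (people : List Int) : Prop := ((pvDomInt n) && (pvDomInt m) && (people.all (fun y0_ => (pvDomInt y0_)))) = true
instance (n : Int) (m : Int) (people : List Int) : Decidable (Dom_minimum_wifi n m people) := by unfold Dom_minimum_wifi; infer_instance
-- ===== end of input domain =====

-- B replaces A's index-jumping scan with two stages: build a work stack of the positions
-- of 1s (reversed), then pop the leftmost person, count, and pop covered positions.

-- ===== PORT A =====
-- A's while loop as fuel recursion: each iteration advances i by 2*m+1 (install) or by 1;
-- fuel n.toNat + 1 suffices on Pre_ (each step increases i by at least one there).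
def goA (n : Int) (m : Int) (people : List Int) : Nat → Int → Int → Int
  | 0, _, count => count
  | Nat.succ fuel, i, count =>
    if i < n then
      match PySem.List.pyGet? people i with
      | some v => if v == 1 then goA n m people fuel (i + 2 * m + 1) (count + 1)
                  else goA n m people fuel (i + 1) count
      | none => count  -- IndexError in Python; excluded by Pre_
    else count

def minimum_wifi (n : Int) (m : Int) (people : List Int) : Int :=
  goA n m people (n.toNat + 1) 0 0

-- ===== PORT B =====
-- inner while loop: `while stack and stack[-1] <= limit: stack.pop()`
-- (stack[-1] then pop() combined as pop?; fuel = stack length, one pop per step)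
def skipB (limit : Int) : Nat → List Int → List Int
  | 0, st => st
  | Nat.succ fuel, st =>
    match PySem.List.pop? st with
    | some (q, rest) => if q ≤ limit then skipB limit fuel rest else st
    | none => st

-- outer while loop: `while stack: p = stack.pop(); count += 1; limit = p + 2*m; <inner>`
def goB (m : Int) : Nat → List Int → Int → Int
  | 0, _, count => count
  | Nat.succ fuel, st, count =>
    match PySem.List.pop? st with
    | some (p, rest) => goB m fuel (skipB (p + 2 * m) rest.length rest) (count + 1)
    | none => count

def minimum_wifi_alt (n : Int) (m : Int) (people : List Int) : Int :=
  let ones := (PySem.List.pyRange 0 n 1).filter (fun i => PySem.List.pyGet? people i == some 1)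
  let stack := (PySem.List.slice? ones none none (-1)).getD []  -- ones[::-1]
  goB m (stack.length + 1) stack 0

-- ===== PRECONDITION & SPEC =====
-- Pre_ excludes n > len(people), where A either raises IndexError or returns only when a jump
-- carries the cursor past n and B raises IndexError, and negative m with a 1 among the first n
-- entries, where A decreases its cursor and loops forever or raises via negative index
-- wraparound while B returns a value.
def Pre_minimum_wifi (n : Int) (m : Int) (people : List Int) : Prop :=
  n ≤ (people.length : Int) ∧ (0 ≤ m ∨ (people.take n.toNat).all (· ≠ 1) = true)
instance (n : Int) (m : Int) (people : List Int) : Decidable (Pre_minimum_wifi n m people) := by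
  unfold Pre_minimum_wifi; infer_instance

def pvWitness_minimum_wifi : Int × Int × List Int := (6, 1, [1, 0, 1, 1, 0, 1])

def Spec_minimum_wifi (n : Int) (m : Int) (people : List Int) (out : Int) : Prop := out = minimum_wifi_alt n m people
instance (n : Int) (m : Int) (people : List Int) (out : Int) : Decidable (Spec_minimum_wifi n m people out) := by unfold Spec_minimum_wifi; infer_instance

-- ===== CLAIM (what is proved, stated in full; the proofs are below) =====
def Claim_equal_minimum_wifi : Prop := ∀ (n : Int) (m : Int) (people : List Int), Dom_minimum_wifi n m people → Pre_minimum_wifi n m people → Spec_minimum_wifi n m people (minimum_wifi n m people)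

-- ===== LEMMAS AND PROOFS =====

-- the positions of 1s in [i, n), in increasing order
def onesFrom (n : Int) (people : List Int) (i : Int) : List Int :=
  (PySem.List.pyRange i n 1).filter (fun j => PySem.List.pyGet? people j == some 1)

-- head-first counting: serve the first position, drop the covered ones, recurse
def cnt (m : Int) : List Int → Int
  | [] => 0
  | p :: rest => 1 + cnt m (rest.dropWhile (fun q => decide (q ≤ p + 2 * m)))
termination_by l => l.length
decreasing_by simpa using Nat.lt_succ_of_le (List.length_dropWhile_le _ rest)

-- the inner stack loop is dropWhile on the reversed list
lemma skipB_reverse (limit : Int) :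
    ∀ (l : List Int) (f : Nat), l.length ≤ f →
      skipB limit f l.reverse = (l.dropWhile (fun q => decide (q ≤ limit))).reverse := by
  intro l
  induction l with
  | nil => intro f _; cases f <;> simp [skipB, PySem.List.pop?]
  | cons a t ih =>
      intro f hf
      cases f with
      | zero => simp at hf
      | succ f =>
          have hpop : PySem.List.pop? (t.reverse ++ [a]) = some (a, t.reverse) :=
            PySem.List.pop?_last t.reverse a
          by_cases ha : a ≤ limit
          · simp [skipB, hpop, ha, ih f (by simpa using Nat.lt_succ_iff.mp (Nat.lt_succ_of_le hf))]
          · simp [skipB, hpop, ha]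

-- the outer stack loop computes cnt of the reversed stack
lemma goB_reverse (m : Int) :
    ∀ (f : Nat) (l : List Int) (count : Int), l.length < f →
      goB m f l.reverse count = count + cnt m l := by
  intro f
  induction f with
  | zero => intro l count hf; omega
  | succ f ih =>
      intro l count hf
      cases l with
      | nil => simp [goB, PySem.List.pop?, cnt]
      | cons p t =>
          have hpop : PySem.List.pop? (t.reverse ++ [p]) = some (p, t.reverse) :=
            PySem.List.pop?_last t.reverse p
          have hskip := skipB_reverse (p + 2 * m) t t.reverse.length (by simp)
          have hlen : (t.dropWhile (fun q => decide (q ≤ p + 2 * m))).length < f := by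
            have := List.length_dropWhile_le (fun q => decide (q ≤ p + 2 * m)) t
            simp at hf; omega
          simp only [List.reverse_cons, goB, hpop, hskip]
          rw [ih _ (count + 1) hlen]
          simp [cnt]; ring

-- goA returns its accumulator once the cursor is at or past n
lemma goA_done (n : Int) (m : Int) (people : List Int) (i count : Int) (h : n ≤ i) :
    ∀ fuel, goA n m people fuel i count = count := by
  intro fuel
  cases fuel with
  | zero => rfl
  | succ fuel => simp [goA, show ¬ i < n by omega]

-- Main invariant (0 ≤ m case): A's scan from cursor i counts cnt of the remaining positions.
lemma A_eq_cnt (n : Int) (m : Int) (people : List Int) (hm : 0 ≤ m)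
    (hlen : n ≤ (people.length : Int)) :
    ∀ (fuel : Nat) (i count : Int), 0 ≤ i → (n - i).toNat < fuel →
      goA n m people fuel i count = count + cnt m (onesFrom n people i) := by
  intro fuel
  induction fuel with
  | zero => intro i count _ hf; omega
  | succ fuel ih =>
      intro i count hi hf
      by_cases hin : i < n
      · obtain ⟨v, hv⟩ : ∃ v, PySem.List.pyGet? people i = some v := by
          rcases h : PySem.List.pyGet? people i with _ | v
          · exact absurd ((PySem.List.pyGet?_eq_none_iff people i).mp h) (by
              simp only [not_not]; constructor <;> omega)
          · exact ⟨v, rfl⟩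
        have hones : onesFrom n people i
            = if v == 1 then i :: onesFrom n people (i + 1) else onesFrom n people (i + 1) := by
          unfold onesFrom
          rw [PySem.List.pyRange_one_cons hin, List.filter_cons]
          by_cases hv1 : v = 1 <;> simp [hv, hv1]
        by_cases hv1 : v = 1
        · -- install: count one, cursor jumps to i + 2*m + 1
          have hdrop : (onesFrom n people (i + 1)).dropWhile (fun q => decide (q ≤ i + 2 * m))
              = onesFrom n people (i + 2 * m + 1) := by
            by_cases hjump : i + 2 * m + 1 ≤ n
            · have hsplit : PySem.List.pyRange (i + 1) n
                  = PySem.List.pyRange (i + 1) (i + 2 * m + 1) ++ PySem.List.pyRange (i + 2 * m + 1) n :=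
                PySem.List.pyRange_one_append (i + 1) (i + 2 * m + 1) n (by omega) hjump
              unfold onesFrom
              rw [hsplit, List.filter_append, List.dropWhile_append]
              have h1 : ((PySem.List.pyRange (i + 1) (i + 2 * m + 1)).filter
                  (fun j => PySem.List.pyGet? people j == some 1)).dropWhile
                  (fun q => decide (q ≤ i + 2 * m)) = [] := by
                rw [List.dropWhile_eq_nil_iff]
                intro x hx
                have := (PySem.List.mem_pyRange_one).mp (List.mem_of_mem_filter hx)
                simp; omega
              have h2 : ((PySem.List.pyRange (i + 2 * m + 1) n).filter
                  (fun j => PySem.List.pyGet? people j == some 1)).dropWhile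
                  (fun q => decide (q ≤ i + 2 * m))
                  = (PySem.List.pyRange (i + 2 * m + 1) n).filter
                    (fun j => PySem.List.pyGet? people j == some 1) := by
                rw [List.dropWhile_eq_self_iff]
                intro hl
                have hmem : _ ∈ (PySem.List.pyRange (i + 2 * m + 1) n).filter
                    (fun j => PySem.List.pyGet? people j == some 1) := List.getElem_mem hl
                have := (PySem.List.mem_pyRange_one).mp (List.mem_of_mem_filter hmem)
                simp; omega
              simp [h1, h2]
            · -- jump lands at or past n: everything remaining is covered
              have hnil : onesFrom n people (i + 2 * m + 1) = [] := by
                unfold onesFrom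
                rw [PySem.List.pyRange_one_eq_nil (by omega)]; rfl
              rw [hnil, List.dropWhile_eq_nil_iff]
              intro x hx
              have := (PySem.List.mem_pyRange_one).mp (List.mem_of_mem_filter hx)
              simp; omega
          have hcnt : cnt m (onesFrom n people i) = 1 + cnt m (onesFrom n people (i + 2 * m + 1)) := by
            rw [hones]; simp [hv1, cnt, hdrop]
          simp only [goA, if_pos hin, hv, hv1, BEq.rfl, if_true]
          by_cases hjump : i + 2 * m + 1 ≤ n
          · rw [ih (i + 2 * m + 1) (count + 1) (by omega) (by omega), hcnt]; ring
          · rw [goA_done n m people _ _ (by omega) fuel, hcnt]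
            have : onesFrom n people (i + 2 * m + 1) = [] := by
              unfold onesFrom
              rw [PySem.List.pyRange_one_eq_nil (by omega)]; rfl
            rw [this]; simp [cnt]
        · have hveq : (v == 1) = false := by simp [hv1]
          simp only [goA, if_pos hin, hv, hveq, if_false, Bool.false_eq_true]
          rw [ih (i + 1) count (by omega) (by omega), hones, hveq]
          simp
      · rw [goA_done n m people i count (by omega)]
        have : onesFrom n people i = [] := by
          unfold onesFrom
          rw [PySem.List.pyRange_one_eq_nil (by omega)]; rfl
        rw [this]; simp [cnt]
-- Zeros case (covers negative m inside Pre_): no 1 among the first n entries.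
lemma goA_zeros (n : Int) (m : Int) (people : List Int)
    (hlen : n ≤ (people.length : Int))
    (hz : ∀ (j : Int), 0 ≤ j → j < n → PySem.List.pyGet? people j ≠ some 1) :
    ∀ (fuel : Nat) (i count : Int), 0 ≤ i → (n - i).toNat < fuel →
      goA n m people fuel i count = count := by
  intro fuel
  induction fuel with
  | zero => intro i count _ hf; omega
  | succ fuel ih =>
      intro i count hi hf
      by_cases hin : i < n
      · obtain ⟨v, hv⟩ : ∃ v, PySem.List.pyGet? people i = some v := by
          rcases h : PySem.List.pyGet? people i with _ | v
          · exact absurd ((PySem.List.pyGet?_eq_none_iff people i).mp h) (by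
              simp only [not_not]; constructor <;> omega)
          · exact ⟨v, rfl⟩
        have hv1 : v ≠ 1 := fun hv1 => hz i hi hin (by rw [hv, hv1])
        have hveq : (v == 1) = false := by simp [hv1]
        simp only [goA, if_pos hin, hv, hveq, if_false, Bool.false_eq_true]
        exact ih (i + 1) count (by omega) (by omega)
      · exact goA_done n m people i count (by omega) _

lemma ones_zeros (n : Int) (people : List Int)
    (hz : ∀ (j : Int), 0 ≤ j → j < n → PySem.List.pyGet? people j ≠ some 1) :
    onesFrom n people 0 = [] := by
  unfold onesFrom
  rw [List.filter_eq_nil_iff]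
  intro j hj
  have := (PySem.List.mem_pyRange_one).mp hj
  simp only [beq_iff_eq]
  exact hz j this.1 this.2

-- ===== VERDICT (by name: the statement is the Claim_ definition above) =====
theorem minimum_wifi_spec : Claim_equal_minimum_wifi := by
  intro n m people _ hpre
  obtain ⟨hlen, hdisj⟩ := hpre
  unfold Spec_minimum_wifi minimum_wifi minimum_wifi_alt
  simp only [PySem.List.slice?_none_none_neg_one, Option.getD_some]
  have hz' : (people.take n.toNat).all (· ≠ 1) = true →
      ∀ (j : Int), 0 ≤ j → j < n → PySem.List.pyGet? people j ≠ some 1 := by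
    intro hz j hj hjn hget
    have hjl : j.toNat < people.length := by omega
    rw [PySem.List.pyGet?_eq_some_getElem people hj (by omega)] at hget
    have hmem : people[j.toNat] ∈ people.take n.toNat := by
      rw [List.mem_iff_getElem]
      exact ⟨j.toNat, by simp [List.length_take]; omega, by rw [List.getElem_take]⟩
    have := (List.all_eq_true).mp hz _ hmem
    simp at this
    exact this (by injection hget)
  have hB : goB m ((onesFrom n people 0).reverse.length + 1) (onesFrom n people 0).reverse 0
      = cnt m (onesFrom n people 0) := by
    have := goB_reverse m ((onesFrom n people 0).reverse.length + 1) (onesFrom n people 0) 0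
      (by simp)
    simpa using this
  show goA n m people (n.toNat + 1) 0 0
      = goB m ((onesFrom n people 0).reverse.length + 1) (onesFrom n people 0).reverse 0
  rw [hB]
  rcases hdisj with hm | hz
  · have := A_eq_cnt n m people hm hlen (n.toNat + 1) 0 0 (by omega) (by omega)
    simpa using this
  · rw [goA_zeros n m people hlen (hz' hz) (n.toNat + 1) 0 0 (by omega) (by omega),
        ones_zeros n people (hz' hz)]
    simp [cnt]
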